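-- pv_equiv track=rewrite | github.com/aorursy/KT_dataset_py | ernie55ernie_learn-python-challenge-day-7-exercises.py | blackjack_hand_greater_than
-- ===== SOURCE A (Python) =====
-- def blackjack_hand_greater_than(hand_1, hand_2):
--     """
--     Return True if hand_1 beats hand_2, and False otherwise.
--
--     In order for hand_1 to beat hand_2 the following must be true:
--     - The total of hand_1 must not exceed 21
--     - The total of hand_1 must exceed the total of hand_2 OR hand_2's total must exceed 21
--
--     Hands are represented as a list of cards. Each card is represented by a string.
--
--     When adding up a hand's total, cards with numbers count for that many points. Face
--     cards ('J', 'Q', and 'K') are worth 10 points. 'A' can count for 1 or 11.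
--
--     When determining a hand's total, you should try to count aces in the way that
--     maximizes the hand's total without going over 21. e.g. the total of ['A', 'A', '9'] is 21,
--     the total of ['A', 'A', '9', '3'] is 14.
--
--     Examples:
--     >>> blackjack_hand_greater_than(['K'], ['3', '4'])
--     True
--     >>> blackjack_hand_greater_than(['K'], ['10'])
--     False
--     >>> blackjack_hand_greater_than(['K', 'K', '2'], ['3'])
--     False
--     """
--     def count(list_of_card):
--         count = 0
--         ace = 0
--         for card in list_of_card:
--             if card.isdigit():
--                 count += int(card)
--             elif card == 'A':
--                 ace += 1
--             else:
--                 count += 10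
--         for a in range(ace):
--             if count + 11 <= 21:
--                 count += 11
--             else:
--                 count += 1
--         return count
--     hand_1_count = count(hand_1)
--     hand_2_count = count(hand_2)
--     if hand_1_count <= 21 and hand_1_count > hand_2_count:
--         return True
--     elif hand_1_count <= 21 and hand_2_count > 21:
--         return True
--     return False
-- ===== SOURCE B (Python) =====
-- def blackjack_hand_greater_than(hand_1, hand_2):
--     def total(hand):
--         base = sum(int(c) if c.isdigit() else 10 for c in hand if c != 'A')
--         aces = hand.count('A')
--         return base + aces + (10 if aces and base <= 10 else 0)
--     h1 = total(hand_1)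
--     h2 = total(hand_2)
--     return h1 <= 21 and (h1 > h2 or h2 > 21)
-- ===== Notes on version B (the rewrite author's own statement) =====
-- stated objective: simpler
-- what changed: Replaces the per-ace greedy loop by a closed-form total (base + aces, plus 10 exactly when there is an ace and base <= 10, which is provably what the greedy loop computes) and collapses the if/elif ladder into one boolean expression.
import Mathlib
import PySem

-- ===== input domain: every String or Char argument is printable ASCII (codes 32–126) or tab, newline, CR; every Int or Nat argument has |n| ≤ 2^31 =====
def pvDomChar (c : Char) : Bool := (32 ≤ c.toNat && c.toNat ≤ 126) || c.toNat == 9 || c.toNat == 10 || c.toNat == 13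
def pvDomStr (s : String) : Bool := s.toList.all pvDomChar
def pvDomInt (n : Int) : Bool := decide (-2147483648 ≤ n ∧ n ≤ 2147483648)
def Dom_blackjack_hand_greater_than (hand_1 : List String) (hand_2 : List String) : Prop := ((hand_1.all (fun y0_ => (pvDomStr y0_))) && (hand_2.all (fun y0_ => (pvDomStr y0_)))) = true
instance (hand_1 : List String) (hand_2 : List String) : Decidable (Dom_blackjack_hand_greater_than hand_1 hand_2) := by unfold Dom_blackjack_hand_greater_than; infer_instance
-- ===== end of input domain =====

-- B replaces A's per-ace greedy loop by a closed-form total and a single boolean comparison; objective: simpler.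


-- ===== PORT A =====
-- 'for a in range(ace): if count + 11 <= 21: count += 11 else: count += 1'
def pvAceLoop (count : Int) : Nat → Int
  | 0 => count
  | n + 1 => if count + 11 ≤ 21 then pvAceLoop (count + 11) n else pvAceLoop (count + 1) n

-- inner helper 'count(list_of_card)': first loop accumulates (count, ace), then the ace loop
def pvCountHand (list_of_card : List String) : Int :=
  let st := list_of_card.foldl
    (fun (st : Int × Nat) card =>
      if PySem.Str.strIsdigit card then (st.1 + (PySem.Int.ofStr? card).getD 0, st.2)
      else if card = "A" then (st.1, st.2 + 1)
      else (st.1 + 10, st.2)) (0, 0)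
  pvAceLoop st.1 st.2

def blackjack_hand_greater_than (hand_1 : List String) (hand_2 : List String) : Bool :=
  let hand_1_count := pvCountHand hand_1
  let hand_2_count := pvCountHand hand_2
  if hand_1_count ≤ 21 ∧ hand_1_count > hand_2_count then true
  else if hand_1_count ≤ 21 ∧ hand_2_count > 21 then true
  else false

-- ===== PORT B =====
-- base = sum(int(c) if c.isdigit() else 10 for c in hand if c != 'A')
def pvBase (hand : List String) : Int :=
  hand.foldl (fun acc c =>
    if c = "A" then acc
    else acc + (if PySem.Str.strIsdigit c then (PySem.Int.ofStr? c).getD 0 else 10)) 0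

def pvTotal (hand : List String) : Int :=
  let base := pvBase hand
  let aces : Int := (hand.count "A" : Int)
  base + aces + (if aces ≠ 0 ∧ base ≤ 10 then 10 else 0)

def blackjack_hand_greater_than_alt (hand_1 : List String) (hand_2 : List String) : Bool :=
  let h1 := pvTotal hand_1
  let h2 := pvTotal hand_2
  decide (h1 ≤ 21) && (decide (h1 > h2) || decide (h2 > 21))

-- ===== PRECONDITION & SPEC =====
def Spec_blackjack_hand_greater_than (hand_1 : List String) (hand_2 : List String) (out : Bool) : Prop := out = blackjack_hand_greater_than_alt hand_1 hand_2
instance (hand_1 : List String) (hand_2 : List String) (out : Bool) : Decidable (Spec_blackjack_hand_greater_than hand_1 hand_2 out) := by unfold Spec_blackjack_hand_greater_than; infer_instance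

-- ===== CLAIM (what is proved, stated in full; the proofs are below) =====
def Claim_equal_blackjack_hand_greater_than : Prop := ∀ (hand_1 : List String) (hand_2 : List String), Dom_blackjack_hand_greater_than hand_1 hand_2 → Spec_blackjack_hand_greater_than hand_1 hand_2 (blackjack_hand_greater_than hand_1 hand_2)

-- ===== LEMMAS AND PROOFS =====
lemma digit_not_space (c : Char) (h : PySem.Chars.isdigit c = true) : PySem.Int.isIntSpace c = false := by
  simp [PySem.Chars.isdigit] at h
  simp only [PySem.Int.isIntSpace, Bool.or_eq_false_iff, decide_eq_false_iff_not]
  refine ⟨⟨⟨⟨⟨?_,?_⟩,?_⟩,?_⟩,?_⟩,?_⟩ <;> rintro rfl <;> simp [Char.le_def] at h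

lemma dropWhile_id_of_digits (s : List Char) (h : ∀ c ∈ s, PySem.Chars.isdigit c = true) :
    s.dropWhile PySem.Int.isIntSpace = s := by
  cases s with
  | nil => rfl
  | cons c t => simp [digit_not_space c (h c (by simp))]

lemma optAux (o : Option ℕ) : 0 ≤ (Option.map (fun n : ℤ => n) (do let a ← o; pure ((a : ℤ)))).getD 0 := by
  rcases o with _ | a <;> simp

-- an all-digit string parses to a nonnegative integer
lemma ofChars?_nonneg (s : List Char) (h : PySem.Chars.strIsdigit s = true) :
    0 ≤ (PySem.Int.ofChars? s).getD 0 := by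
  simp [PySem.Chars.strIsdigit, List.all_eq_true] at h
  obtain ⟨h1, h2⟩ := h
  unfold PySem.Int.ofChars?
  rw [dropWhile_id_of_digits s h2, dropWhile_id_of_digits _ (by intro c hc; exact h2 c (by simpa using hc)), List.reverse_reverse]
  cases s with
  | nil => simp at h1
  | cons c t =>
    have hd := h2 c (by simp)
    have hne1 : c ≠ '-' := by rintro rfl; simp [PySem.Chars.isdigit, Char.le_def] at hd
    have hne2 : c ≠ '+' := by rintro rfl; simp [PySem.Chars.isdigit, Char.le_def] at hd
    dsimp only
    split
    · simp_all
    · simp_all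
    · exact optAux _

lemma ofStr?_nonneg (s : String) (h : PySem.Str.strIsdigit s = true) :
    0 ≤ (PySem.Int.ofStr? s).getD 0 := by
  simp only [PySem.Str.strIsdigit] at h
  simpa [PySem.Int.ofStr?] using ofChars?_nonneg s.toList h

-- A's first loop computes (B's base sum, number of aces)
lemma foldA_eq (cards : List String) : ∀ (c : Int) (a : Nat),
    cards.foldl
      (fun (st : Int × Nat) card =>
        if PySem.Str.strIsdigit card then (st.1 + (PySem.Int.ofStr? card).getD 0, st.2)
        else if card = "A" then (st.1, st.2 + 1)
        else (st.1 + 10, st.2)) (c, a)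
    = (cards.foldl (fun acc card =>
        if card = "A" then acc
        else acc + (if PySem.Str.strIsdigit card then (PySem.Int.ofStr? card).getD 0 else 10)) c,
       a + cards.count "A") := by
  induction cards with
  | nil => simp
  | cons card rest ih =>
    intro c a
    simp only [List.foldl_cons]
    by_cases hA : card = "A"
    · have hd9 : ¬ (PySem.Str.strIsdigit card = true) := by subst hA; decide
      rw [if_neg hd9, if_pos hA, if_pos hA, ih]
      subst hA
      simp
      omega
    · by_cases hd : PySem.Str.strIsdigit card = true
      · rw [if_pos hd, if_neg hA, if_pos hd, ih]
        simp [hA]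
      · rw [if_neg hd, if_neg hA, if_neg hA, if_neg hd, ih]
        simp [hA]

lemma base_nonneg (cards : List String) : ∀ (c : Int), 0 ≤ c →
    0 ≤ cards.foldl (fun acc card =>
        if card = "A" then acc
        else acc + (if PySem.Str.strIsdigit card then (PySem.Int.ofStr? card).getD 0 else 10)) c := by
  induction cards with
  | nil => intro c hc; simpa using hc
  | cons card rest ih =>
    intro c hc
    simp only [List.foldl_cons]
    apply ih
    by_cases hA : card = "A"
    · rw [if_pos hA]; exact hc
    · rw [if_neg hA]
      by_cases hd : PySem.Str.strIsdigit card = true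
      · rw [if_pos hd]
        have := ofStr?_nonneg card hd
        omega
      · rw [if_neg hd]
        omega

lemma aceLoop_ge (n : Nat) : ∀ (c : Int), 11 ≤ c → pvAceLoop c n = c + n := by
  induction n with
  | zero => intro c _; simp [pvAceLoop]
  | succ n ih =>
    intro c hc
    have hcond : ¬ (c + 11 ≤ 21) := by omega
    simp only [pvAceLoop, if_neg hcond]
    rw [ih (c + 1) (by omega)]
    push_cast; ring

-- the greedy ace loop in closed form (for nonnegative starting count)
lemma aceLoop_closed (c : Int) (n : Nat) (hc : 0 ≤ c) :
    pvAceLoop c n = c + n + (if (n : Int) ≠ 0 ∧ c ≤ 10 then 10 else 0) := by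
  cases n with
  | zero => simp [pvAceLoop]
  | succ n =>
    by_cases h : c + 11 ≤ 21
    · simp only [pvAceLoop, if_pos h]
      rw [aceLoop_ge n (c + 11) (by omega)]
      have : ((n : Int) + 1 ≠ 0 ∧ c ≤ 10) := by constructor <;> omega
      rw [if_pos (by push_cast; exact this)]
      push_cast; ring
    · simp only [pvAceLoop, if_neg h]
      rw [aceLoop_ge n (c + 1) (by omega)]
      rw [if_neg (by push_cast; omega)]
      push_cast; ring

lemma countHand_eq_total (hand : List String) : pvCountHand hand = pvTotal hand := by
  unfold pvCountHand pvTotal pvBase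
  rw [foldA_eq hand 0 0]
  simp only
  rw [aceLoop_closed _ _ (base_nonneg hand 0 le_rfl)]
  simp

-- ===== VERDICT (by name: the statement is the Claim_ definition above) =====
theorem blackjack_hand_greater_than_spec : Claim_equal_blackjack_hand_greater_than := by
  intro hand_1 hand_2 _
  unfold Spec_blackjack_hand_greater_than blackjack_hand_greater_than blackjack_hand_greater_than_alt
  rw [countHand_eq_total, countHand_eq_total]
  set t1 := pvTotal hand_1
  set t2 := pvTotal hand_2
  by_cases h1 : t1 ≤ 21 <;> by_cases h2 : t1 > t2 <;> by_cases h3 : t2 > 21 <;>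
    simp [h1, h2, h3]
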